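-- pv_equiv track=rewrite | github.com/111922-bat/traffic-emergency-response-gcn-lstm | services/congestion_analyzer.py | _find_cascade_path
-- ===== SOURCE A (Python) =====
-- from typing import Dict, List, Tuple, Optional, Union, Any, Set
--
-- def _find_cascade_path(source: str, depth: int,
--                       traffic_network: Dict[str, Any]) -> List[str]:
--     """找到级联路径"""
--     path = [source]
--     current = source
--
--     for i in range(depth):
--         next_node = f"{current}_cascade_{i+1}"
--         path.append(next_node)
--         current = next_node
--
--     return path
-- ===== SOURCE B (Python) =====
-- from typing import Dict, List, Any
--
-- def _find_cascade_path(source: str, depth: int,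
--                        traffic_network: Dict[str, Any]) -> List[str]:
--     # Build the deepest node's name once, then read every path element off it
--     # as a prefix slice at the cumulative cut positions.
--     suffixes = [f"_cascade_{i+1}" for i in range(depth)]
--     full = source + "".join(suffixes)
--     cuts = [len(source)]
--     t = len(source)
--     for s in suffixes:
--         t += len(s)
--         cuts.append(t)
--     return [full[:c] for c in cuts]
-- ===== Notes on version B (the rewrite author's own statement) =====
-- stated objective: alternative
-- what changed: B never concatenates path nodes incrementally: it builds the single deepest node string once (source + joined suffixes), computes the cumulative cut positions from the suffix lengths, and reads each path element off the full string as a prefix slice, instead of A's loop that grows a mutable current string and appends it each iteration.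
import Mathlib
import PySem

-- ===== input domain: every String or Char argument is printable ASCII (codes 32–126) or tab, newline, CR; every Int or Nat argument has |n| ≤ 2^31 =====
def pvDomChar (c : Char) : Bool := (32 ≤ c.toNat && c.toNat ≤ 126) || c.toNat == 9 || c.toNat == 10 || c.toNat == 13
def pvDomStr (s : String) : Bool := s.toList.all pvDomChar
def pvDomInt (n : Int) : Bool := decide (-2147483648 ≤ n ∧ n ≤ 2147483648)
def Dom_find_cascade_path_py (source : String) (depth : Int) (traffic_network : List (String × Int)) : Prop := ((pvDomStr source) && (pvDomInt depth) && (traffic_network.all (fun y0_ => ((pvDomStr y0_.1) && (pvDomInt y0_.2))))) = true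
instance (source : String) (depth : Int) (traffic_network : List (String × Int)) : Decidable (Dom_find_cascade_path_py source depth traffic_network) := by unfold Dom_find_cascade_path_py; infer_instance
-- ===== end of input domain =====

-- B builds the deepest node's name once and reads each path element off it as a
-- prefix slice at cumulative cut positions, instead of A's loop growing a mutable
-- current string and appending it each iteration (objective: alternative).

-- ===== PORT A =====
-- path=[source]; current=source; for i in range(depth): next=f"{current}_cascade_{i+1}"; path.append(next); current=next
def find_cascade_path_py (source : String) (depth : Int) (traffic_network : List (String × Int)) : List String :=
  ((PySem.List.pyRange 0 depth 1).foldl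
    (fun (st : List String × String) i =>
      let next_node := st.2 ++ "_cascade_" ++ PySem.Int.toStr (i + 1)
      (st.1 ++ [next_node], next_node))
    ([source], source)).1

-- ===== PORT B =====
-- suffixes; full = source + "".join(suffixes); cuts by running total of lengths; [full[:c] for c in cuts]
def find_cascade_path_py_alt (source : String) (depth : Int) (traffic_network : List (String × Int)) : List String :=
  let suffixes := (PySem.List.pyRange 0 depth 1).map (fun i => "_cascade_" ++ PySem.Int.toStr (i + 1))
  let full := source ++ PySem.Str.join "" suffixes
  let cuts := suffixes.foldl
    (fun (st : List Int × Int) s =>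
      let t := st.2 + PySem.Str.len s
      (st.1 ++ [t], t))
    ([PySem.Str.len source], PySem.Str.len source)
  cuts.1.map (fun c => PySem.Str.slice full none (some c))

-- ===== PRECONDITION & SPEC =====
def Spec_find_cascade_path_py (source : String) (depth : Int) (traffic_network : List (String × Int)) (out : List String) : Prop := out = find_cascade_path_py_alt source depth traffic_network
instance (source : String) (depth : Int) (traffic_network : List (String × Int)) (out : List String) : Decidable (Spec_find_cascade_path_py source depth traffic_network out) := by unfold Spec_find_cascade_path_py; infer_instance

-- ===== CLAIM (what is proved, stated in full; the proofs are below) =====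
def Claim_equal_find_cascade_path_py : Prop := ∀ (source : String) (depth : Int) (traffic_network : List (String × Int)), Dom_find_cascade_path_py source depth traffic_network → Spec_find_cascade_path_py source depth traffic_network (find_cascade_path_py source depth traffic_network)

-- ===== LEMMAS AND PROOFS =====

-- running concatenation [a, a++s1, a++s1++s2, …] — the common value both ports are reduced to
def pvAcc (c : String) (l : List String) : List String :=
  match l with
  | [] => [c]
  | s :: rest => c :: pvAcc (c ++ s) rest

theorem pvAcc_head (c : String) (l : List String) :
    pvAcc c l = c :: (pvAcc c l).tail := by
  cases l <;> simp [pvAcc]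

-- A's fold over any index list equals the running concatenation of the mapped suffixes.
theorem foldl_eq_acc (rest : List Int) (path : List String) (current : String) :
    (rest.foldl
      (fun (st : List String × String) i =>
        let next_node := st.2 ++ "_cascade_" ++ PySem.Int.toStr (i + 1)
        (st.1 ++ [next_node], next_node))
      (path, current)).1
    = path ++ (pvAcc current (rest.map (fun i => "_cascade_" ++ PySem.Int.toStr (i + 1)))).tail := by
  induction rest generalizing path current with
  | nil => simp [pvAcc]
  | cons a rest ih =>
      simp only [List.foldl_cons, List.map_cons, pvAcc, List.tail_cons]
      rw [ih]
      simp only [String.append_assoc, List.append_assoc, List.singleton_append]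
      rw [← pvAcc_head]

-- the cut positions produced by B's fold
def pvCuts (t : Int) (l : List String) : List Int :=
  match l with
  | [] => []
  | s :: rest => (t + PySem.Str.len s) :: pvCuts (t + PySem.Str.len s) rest

theorem cuts_fold_eq (l : List String) (init : List Int) (t : Int) :
    (l.foldl
      (fun (st : List Int × Int) s =>
        let t := st.2 + PySem.Str.len s
        (st.1 ++ [t], t))
      (init, t)).1 = init ++ pvCuts t l := by
  induction l generalizing init t with
  | nil => simp [pvCuts]
  | cons s rest ih =>
      simp only [List.foldl_cons, pvCuts]
      rw [ih]
      simp

theorem inter_nil {α : Type} (xs : List (List α)) : List.intercalate [] xs = xs.flatten := by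
  induction xs with
  | nil => simp [List.intercalate]
  | cons a xs ih =>
    cases xs with
    | nil => simp [List.intercalate]
    | cons b ys =>
      simp only [List.intercalate, List.intersperse] at *
      simp_all

theorem join_empty_nil : PySem.Str.join "" ([] : List String) = "" := by
  apply String.toList_inj.mp
  simp [PySem.Str.toList_join, PySem.Chars.join, inter_nil]

theorem join_empty_cons (s : String) (l : List String) :
    PySem.Str.join "" (s :: l) = s ++ PySem.Str.join "" l := by
  apply String.toList_inj.mp
  simp [PySem.Str.toList_join, PySem.Chars.join, inter_nil]

theorem len_append (a b : String) :
    PySem.Str.len (a ++ b) = PySem.Str.len a + PySem.Str.len b := by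
  simp [PySem.Str.len]

theorem slice_prefix (a b : String) :
    PySem.Str.slice (a ++ b) none (some (PySem.Str.len a)) = a := by
  apply String.toList_inj.mp
  simp [PySem.Str.len, PySem.List.slice_to_natCast]

-- B's prefix slices at the cut positions are exactly the running concatenation.
theorem slices_eq_acc (l : List String) (a : String) :
    ((PySem.Str.len a :: pvCuts (PySem.Str.len a) l).map
      (fun c => PySem.Str.slice (a ++ PySem.Str.join "" l) none (some c))) = pvAcc a l := by
  induction l generalizing a with
  | nil =>
      simp [pvCuts, pvAcc, join_empty_nil]
      simpa using slice_prefix a ""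
  | cons s r ih =>
      have hfull : a ++ PySem.Str.join "" (s :: r) = (a ++ s) ++ PySem.Str.join "" r := by
        rw [join_empty_cons, String.append_assoc]
      simp only [pvCuts, pvAcc, List.map_cons, hfull, ← len_append]
      rw [← ih (a ++ s)]
      simp only [List.map_cons]
      congr 1
      rw [String.append_assoc]
      exact slice_prefix a (s ++ PySem.Str.join "" r)

-- ===== VERDICT (by name: the statement is the Claim_ definition above) =====
theorem find_cascade_path_py_spec : Claim_equal_find_cascade_path_py := by
  intro source depth tn _
  unfold Spec_find_cascade_path_py find_cascade_path_py find_cascade_path_py_alt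
  rw [foldl_eq_acc]
  simp only [cuts_fold_eq, List.singleton_append, slices_eq_acc]
  rw [pvAcc_head source]
  simp
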